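-- pv_equiv track=rewrite | github.com/accus84/python_bootcamp_28032020 | moje_skrypty/nauka/funkcje/004_funkcje.py | policz_znaki
-- ===== SOURCE A (Python) =====
-- def policz_znaki(text, start = "<", stop = ">"):        #domyślne wartości to start jako < i stop jako >
--     poziom = 0
--     licznik = 0
--     for i in text:                                      #dla każdego naku w tekście
--         if i == start:                                  #jeśli znakiem jest '<'
--             poziom += 1                                 #dodaje do poziomu +1 aż napotkam znak stop
--             continue                                    #continue oznacza że jak natkieniemy się znowu na znak '<' to i tak będzie dalsze zliczanie
--         elif i == stop:                                 #a kiedy już napotkam znak stop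
--             poziom -= 1                                 #to odejmuje od poziomu wartość -1
--             continue
--         licznik += poziom                               #po każdym obrocie zliczany jet licznik przez dodawanie kolejno poziomu
--     return licznik
-- ===== SOURCE B (Python) =====
-- def policz_znaki(text, start="<", stop=">"):
--     # Staged passes: map chars to deltas, prefix-sum into nesting levels,
--     # then sum the level at each plain (non-bracket) position.
--     deltas = [1 if c == start else (-1 if c == stop else 0) for c in text]
--     levels = []
--     lvl = 0
--     for d in deltas:
--         lvl += d
--         levels.append(lvl)
--     return sum(v for c, v in zip(text, levels) if c != start and c != stop)
-- ===== Notes on version B (the rewrite author's own statement) =====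
-- stated objective: alternative
-- what changed: Instead of one fused loop mutating (poziom, licznik), B computes three staged passes: a per-character delta list, its prefix sums (the nesting level at each position), and a filtered sum of those levels at non-bracket positions.
import Mathlib
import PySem

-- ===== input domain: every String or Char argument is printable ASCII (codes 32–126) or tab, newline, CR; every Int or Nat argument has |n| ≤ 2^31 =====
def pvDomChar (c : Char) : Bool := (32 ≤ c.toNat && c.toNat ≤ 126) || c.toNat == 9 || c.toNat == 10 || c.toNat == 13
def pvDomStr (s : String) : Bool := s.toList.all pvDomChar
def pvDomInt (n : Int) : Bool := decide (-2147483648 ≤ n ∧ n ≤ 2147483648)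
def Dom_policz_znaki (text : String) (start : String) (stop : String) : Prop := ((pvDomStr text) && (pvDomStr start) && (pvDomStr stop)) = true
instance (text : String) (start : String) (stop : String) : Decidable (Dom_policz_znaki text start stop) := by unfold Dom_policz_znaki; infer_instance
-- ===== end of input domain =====

-- B replaces A's single fused loop by three staged passes — delta list, prefix
-- sums (nesting levels), filtered sum at non-bracket positions
-- (objective: alternative decomposition, same cost).


-- ===== PORT A =====
-- forward fold with state (poziom, licznik); `i == start` compares the
-- one-char string of the current character with `start`, as Python does
def policz_znaki (text : String) (start : String) (stop : String) : Int :=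
  (text.toList.foldl
    (fun (st : Int × Int) (i : Char) =>
      if String.ofList [i] = start then (st.1 + 1, st.2)
      else if String.ofList [i] = stop then (st.1 - 1, st.2)
      else (st.1, st.2 + st.1))
    (0, 0)).2

-- ===== PORT B =====
-- prefix sums of the delta list (the `levels` loop of Source B)
def pvLevels (lvl : Int) : List Int → List Int
  | [] => []
  | d :: ds => (lvl + d) :: pvLevels (lvl + d) ds

def policz_znaki_alt (text : String) (start : String) (stop : String) : Int :=
  let cs := text.toList
  let deltas := cs.map (fun c =>
    if String.ofList [c] = start then (1 : Int)
    else if String.ofList [c] = stop then -1 else 0)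
  let levels := pvLevels 0 deltas
  (((cs.zip levels).filter
      (fun p => !(String.ofList [p.1] == start) && !(String.ofList [p.1] == stop))).map
    Prod.snd).sum

-- ===== PRECONDITION & SPEC =====
def Spec_policz_znaki (text : String) (start : String) (stop : String) (out : Int) : Prop := out = policz_znaki_alt text start stop
instance (text : String) (start : String) (stop : String) (out : Int) : Decidable (Spec_policz_znaki text start stop out) := by unfold Spec_policz_znaki; infer_instance

-- ===== CLAIM (what is proved, stated in full; the proofs are below) =====
def Claim_equal_policz_znaki : Prop := ∀ (text : String) (start : String) (stop : String), Dom_policz_znaki text start stop → Spec_policz_znaki text start stop (policz_znaki text start stop)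

-- ===== LEMMAS AND PROOFS =====

-- main invariant: A's fold from state (p, l) equals l plus B's staged sum
-- computed with prefix sums started at p
theorem key (start stop : String) (cs : List Char) :
    ∀ p l : Int,
      (cs.foldl
        (fun (st : Int × Int) (i : Char) =>
          if String.ofList [i] = start then (st.1 + 1, st.2)
          else if String.ofList [i] = stop then (st.1 - 1, st.2)
          else (st.1, st.2 + st.1))
        (p, l)).2
      = l + (((cs.zip (pvLevels p (cs.map (fun c =>
            if String.ofList [c] = start then (1 : Int)
            else if String.ofList [c] = stop then -1 else 0)))).filter
          (fun q => !(String.ofList [q.1] == start) && !(String.ofList [q.1] == stop))).map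
        Prod.snd).sum := by
  induction cs with
  | nil => intro p l; simp
  | cons c cs ih =>
    intro p l
    simp only [List.foldl_cons, List.map_cons, pvLevels, List.zip_cons_cons,
      List.filter_cons]
    by_cases hs : String.ofList [c] = start
    · simp [hs, ih]
    · by_cases ht : String.ofList [c] = stop
      · have hne : stop ≠ start := fun h => hs (ht.trans h)
        rw [if_neg hs, if_pos ht, ih]
        have h1 : p + (-1 : Int) = p - 1 := by ring
        simp [ht, hne, h1]
      · have hb : (!(String.ofList [c] == start) && !(String.ofList [c] == stop)) = true := by
          simp [hs, ht]
        simp only [if_neg hs, if_neg ht, hb, if_true, add_zero, List.map_cons, List.sum_cons]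
        rw [ih]
        omega

-- ===== VERDICT (by name: the statement is the Claim_ definition above) =====
theorem policz_znaki_spec : Claim_equal_policz_znaki := by
  intro text start stop _
  show policz_znaki text start stop = policz_znaki_alt text start stop
  unfold policz_znaki policz_znaki_alt
  have := key start stop text.toList 0 0
  simpa using this
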